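-- pv_equiv track=rewrite | github.com/nealcox/aoc2021 | day03/part2.py | co2_rating
-- ===== SOURCE A (Python) =====
-- def co2_rating(nums, digit):
--     if len(nums) == 1:
--         return nums
--
--     ones = []
--     zeroes = []
--     for n in nums:
--         if n[digit] == "1":
--             ones.append(n)
--         else:
--             zeroes.append(n)
--
--     if len(ones) >= len(zeroes):
--         return zeroes
--     else:
--         return ones
-- ===== SOURCE B (Python) =====
-- def co2_rating(nums, digit):
--     if len(nums) == 1:
--         return nums
--     s = sorted(nums, key=lambda n: 1 if n[digit] == "1" else 0)
--     z = sum(1 for n in nums if n[digit] != "1")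
--     return s[:z] if len(nums) - z >= z else s[z:]
-- ===== Notes on version B (the rewrite author's own statement) =====
-- stated objective: alternative
-- what changed: Instead of partitioning into two appended lists, B stably sorts the list by the digit key (zeroes before ones, original order preserved within each group) and returns the appropriate slice of the sorted list.
import Mathlib
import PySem

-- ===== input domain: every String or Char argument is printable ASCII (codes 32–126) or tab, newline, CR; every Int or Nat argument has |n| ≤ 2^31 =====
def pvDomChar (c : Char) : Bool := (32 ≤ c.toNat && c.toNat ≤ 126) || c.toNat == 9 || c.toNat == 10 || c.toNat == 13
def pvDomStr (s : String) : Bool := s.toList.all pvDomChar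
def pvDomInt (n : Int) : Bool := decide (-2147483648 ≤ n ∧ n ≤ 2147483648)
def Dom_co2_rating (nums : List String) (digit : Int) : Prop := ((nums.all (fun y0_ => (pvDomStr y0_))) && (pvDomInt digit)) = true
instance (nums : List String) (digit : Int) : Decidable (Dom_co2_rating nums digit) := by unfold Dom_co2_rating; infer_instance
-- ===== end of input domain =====

-- B replaces A's two-list partition by a stable sort on the digit key followed by slicing (alternative algorithm).

-- ===== PORT A =====
def co2_rating (nums : List String) (digit : Int) : List String :=
  if nums.length = 1 then nums
  else
    let p := nums.foldl
      (fun (acc : List String × List String) n =>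
        if PySem.Str.pyGet? n digit = some '1' then (acc.1 ++ [n], acc.2)
        else (acc.1, acc.2 ++ [n]))
      ([], [])
    if p.2.length ≤ p.1.length then p.2 else p.1

-- ===== PORT B =====
def co2_rating_alt (nums : List String) (digit : Int) : List String :=
  if nums.length = 1 then nums
  else
    let s := PySem.List.sorted nums
      (fun n => if PySem.Str.pyGet? n digit = some '1' then (1 : Int) else 0)
    let z : Int := (nums.countP (fun n => !decide (PySem.Str.pyGet? n digit = some '1')) : Nat)
    if (nums.length : Int) - z ≥ z then PySem.List.slice s none (some z)
    else PySem.List.slice s (some z) none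

-- ===== PRECONDITION & SPEC =====
-- Pre_: A indexes every string (unless the single-element guard fires), so the index must be in range for each string.
def Pre_co2_rating (nums : List String) (digit : Int) : Prop :=
  nums.length = 1 ∨ ∀ s ∈ nums, PySem.Raise.InRange s.toList.length digit
instance (nums : List String) (digit : Int) : Decidable (Pre_co2_rating nums digit) := by
  unfold Pre_co2_rating; infer_instance

def pvWitness_co2_rating : List String × Int := (["10", "01", "11"], 0)

def Spec_co2_rating (nums : List String) (digit : Int) (out : List String) : Prop := out = co2_rating_alt nums digit
instance (nums : List String) (digit : Int) (out : List String) : Decidable (Spec_co2_rating nums digit out) := by unfold Spec_co2_rating; infer_instance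

-- ===== CLAIM (what is proved, stated in full; the proofs are below) =====
def Claim_equal_co2_rating : Prop := ∀ (nums : List String) (digit : Int), Dom_co2_rating nums digit → Pre_co2_rating nums digit → Spec_co2_rating nums digit (co2_rating nums digit)

-- ===== LEMMAS AND PROOFS =====

-- A's loop with two appended accumulators is a pair of filters.
theorem foldl_partition (digit : Int) (l a b : List String) :
    l.foldl
      (fun (acc : List String × List String) n =>
        if PySem.Str.pyGet? n digit = some '1' then (acc.1 ++ [n], acc.2)
        else (acc.1, acc.2 ++ [n]))
      (a, b)
    = (a ++ l.filter (fun n => decide (PySem.Str.pyGet? n digit = some '1')),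
       b ++ l.filter (fun n => !decide (PySem.Str.pyGet? n digit = some '1'))) := by
  induction l generalizing a b with
  | nil => simp
  | cons x xs ih =>
      simp only [List.foldl_cons, List.filter_cons]
      by_cases h : PySem.Str.pyGet? x digit = some '1'
      · rw [if_pos h, ih, decide_eq_true h]
        simp
      · rw [if_neg h, ih, decide_eq_false h]
        simp

theorem filter_length_split (p : String → Bool) (l : List String) :
    (l.filter p).length + (l.filter (fun x => !p x)).length = l.length := by
  induction l with
  | nil => simp
  | cons y ys ih => by_cases h : p y <;> simp [h] <;> omega

-- insertBy places x just before the first element b whose key exceeds x's.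
theorem insertBy_middle {α : Type} (before : α → α → Bool) (x b : α) (A B : List α)
    (hA : ∀ y ∈ A, before x y = false) (hb : before x b = true) :
    PySem.List.insertBy before x (A ++ b :: B) = A ++ x :: b :: B := by
  induction A with
  | nil => simp [PySem.List.insertBy, hb]
  | cons a A ih =>
      have ha : before x a = false := hA a (by simp)
      simp only [List.cons_append, PySem.List.insertBy, ha]
      simp only [Bool.false_eq_true, if_false, List.cons.injEq, true_and]
      exact ih (fun y hy => hA y (by simp [hy]))

-- Stable insertion sort on a 0/1 key keeps zero-key elements (in order) before one-key elements (in order).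
theorem sort_split (pb : String → Bool) (l Z O : List String)
    (hZ : ∀ y ∈ Z, pb y = false) (hO : ∀ y ∈ O, pb y = true) :
    l.foldl (fun acc x => PySem.List.insertBy
        (fun a b => decide ((if pb a then (1 : Int) else 0) < (if pb b then (1 : Int) else 0))) x acc)
      (Z ++ O)
    = (Z ++ l.filter (fun x => !pb x)) ++ (O ++ l.filter pb) := by
  induction l generalizing Z O with
  | nil => simp
  | cons x xs ih =>
      simp only [List.foldl_cons, List.filter_cons]
      by_cases hx : pb x
      · have h1 : PySem.List.insertBy
            (fun a b => decide ((if pb a then (1 : Int) else 0) < (if pb b then (1 : Int) else 0))) x (Z ++ O)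
            = Z ++ (O ++ [x]) := by
          rw [← List.append_assoc]
          apply PySem.List.insertBy_of_forall_not_before
          intro y hy
          rcases List.mem_append.mp hy with h | h
          · simp [hx, hZ y h]
          · simp [hx, hO y h]
        rw [h1, ih Z (O ++ [x]) hZ
            (fun y hy => by rcases List.mem_append.mp hy with h | h
                            · exact hO y h
                            · simp at h; simpa [h])]
        simp [hx]
      · have hZx : ∀ y ∈ Z ++ [x], pb y = false := by
          intro y hy
          rcases List.mem_append.mp hy with h | h
          · exact hZ y h
          · simp at h; subst h; exact Bool.eq_false_iff.mpr hx
        cases O with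
        | nil =>
            have h1 : PySem.List.insertBy
                (fun a b => decide ((if pb a then (1 : Int) else 0) < (if pb b then (1 : Int) else 0))) x (Z ++ [])
                = (Z ++ [x]) ++ [] := by
              rw [List.append_nil, List.append_nil]
              exact PySem.List.insertBy_of_forall_not_before _ _ _
                (fun y hy => by simp [hx, hZ y hy])
            rw [h1, ih (Z ++ [x]) [] hZx (by simp)]
            simp [hx]
        | cons b O' =>
            have h1 : PySem.List.insertBy
                (fun a b => decide ((if pb a then (1 : Int) else 0) < (if pb b then (1 : Int) else 0))) x (Z ++ b :: O')
                = (Z ++ [x]) ++ b :: O' := by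
              rw [List.append_assoc, List.singleton_append]
              apply insertBy_middle
              · intro y hy; simp [hx, hZ y hy]
              · simp [hx, hO b (by simp)]
            rw [h1, ih (Z ++ [x]) (b :: O') hZx hO]
            simp [hx]

-- ===== VERDICT (by name: the statement is the Claim_ definition above) =====
theorem co2_rating_spec : Claim_equal_co2_rating := by
  intro nums digit _ _
  unfold Spec_co2_rating co2_rating co2_rating_alt
  by_cases h1 : nums.length = 1
  · simp [h1]
  · simp only [h1, if_false]
    rw [foldl_partition]
    simp only [List.nil_append]
    set pb : String → Bool := fun n => decide (PySem.Str.pyGet? n digit = some '1') with hpb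
    have hsort : PySem.List.sorted nums
        (fun n => if PySem.Str.pyGet? n digit = some '1' then (1 : Int) else 0)
        = nums.filter (fun x => !pb x) ++ nums.filter pb := by
      rw [PySem.List.sorted_eq_foldl_insertBy]
      have := sort_split pb nums [] [] (by simp) (by simp)
      simp only [List.nil_append] at this
      rw [← this]
      apply PySem.List.foldl_congr_mem
      intro acc x _
      congr 1
      funext a b
      by_cases ha : pb a <;> by_cases hb : pb b <;>
        simp_all
    rw [hsort]
    have hz : nums.countP (fun n => !pb n) = (nums.filter (fun x => !pb x)).length :=
      List.countP_eq_length_filter ..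
    have hsplit := filter_length_split pb nums
    by_cases hc : (nums.filter (fun x => !pb x)).length ≤ (nums.filter pb).length
    · rw [if_pos hc, if_pos (by rw [hz]; omega)]
      rw [PySem.List.slice_to _ (by positivity), Int.toNat_natCast, hz, List.take_left' rfl]
    · rw [if_neg hc, if_neg (by rw [hz]; omega)]
      rw [PySem.List.slice_from _ (by positivity), Int.toNat_natCast, hz, List.drop_left' rfl]
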